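-- pv_equiv track=rewrite | github.com/oduwsdl/wdill | timelapse.py | extractYearFromUrlOld
-- ===== SOURCE A (Python) =====
-- def extractYearFromUrlOld(url):
-- 	if(len(url) > 0):
--
-- 		#http://www.webarchive.org.uk:80/wayback/archive/20090101092312/http://www.google.com/
-- 		lasIndexOfHTTPMarker = url.rfind("/http://")
-- 		if lasIndexOfHTTPMarker<0:
-- 			lasIndexOfHTTPMarker = url.rfind("/https://")
-- 		lasIndexOfHTTPMarker = lasIndexOfHTTPMarker - 1
-- 		yearExtract = ''
--
-- 		for i in range(lasIndexOfHTTPMarker, -1, -1):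
-- 			#consider review of this block
-- 			try:
-- 				value = int(url[i])
-- 				yearExtract = url[i] + yearExtract
-- 			except ValueError:
-- 				break
--
-- 		yearExtract = yearExtract[0:4]
-- 		return yearExtract
-- ===== SOURCE B (Python) =====
-- def extractYearFromUrlOld(url):
-- 	if not url:
-- 		return None
-- 	idx = url.rfind("/http://")
-- 	if idx < 0:
-- 		idx = url.rfind("/https://")
-- 	prefix = url[:max(idx, 0)]
-- 	run = prefix[len(prefix.rstrip("0123456789")):]
-- 	return run[:4]
-- ===== Notes on version B (the rewrite author's own statement) =====
-- stated objective: idiomatic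
-- what changed: Replaces the explicit backward index loop with try/except int() per character by slicing the prefix before the marker and stripping its trailing digits with str.rstrip, then taking the first four characters of the run.
import Mathlib
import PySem

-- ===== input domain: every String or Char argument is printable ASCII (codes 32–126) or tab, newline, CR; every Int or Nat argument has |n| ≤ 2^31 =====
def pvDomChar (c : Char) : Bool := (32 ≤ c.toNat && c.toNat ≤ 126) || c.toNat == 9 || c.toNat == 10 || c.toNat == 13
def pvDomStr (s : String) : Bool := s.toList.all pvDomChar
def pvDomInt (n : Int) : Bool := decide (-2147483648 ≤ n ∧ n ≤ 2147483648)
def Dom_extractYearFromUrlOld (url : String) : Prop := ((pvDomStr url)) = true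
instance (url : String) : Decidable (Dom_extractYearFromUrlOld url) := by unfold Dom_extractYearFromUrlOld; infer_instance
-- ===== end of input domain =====

-- B replaces A's backward index loop with try/except int() by slicing the prefix before the
-- marker and stripping its trailing digits (str.rstrip), then taking the first four: idiomatic.

-- ===== PORT A =====
-- A's `for i in range(lasIndexOfHTTPMarker, -1, -1)` with break: structural recursion counting
-- down from lasIndexOfHTTPMarker+1; `try: value = int(url[i]) except ValueError: break` is
-- PySem.Int.ofChars? on the one-character string (none = ValueError → break). Every index read
-- is in range (i < rfind result ≤ len url), so List.getD's default is never consulted.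
def pvALoop (cs : List Char) : Nat → List Char → List Char
  | 0, acc => acc
  | j+1, acc =>
      match PySem.Int.ofChars? [cs.getD j ' '] with
      | some _ => pvALoop cs j (cs.getD j ' ' :: acc)
      | none => acc

def extractYearFromUrlOld (url : String) : Option String :=
  if PySem.Str.len url > 0 then
    let i0 := PySem.Str.rfind url "/http://"
    let lasIndexOfHTTPMarker := if i0 < 0 then PySem.Str.rfind url "/https://" else i0
    let last := lasIndexOfHTTPMarker - 1
    let yearExtract := pvALoop url.toList (last + 1).toNat []
    some (String.ofList (PySem.List.slice yearExtract (some 0) (some 4)))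
  else none

-- ===== PORT B =====
-- `prefix.rstrip("0123456789")` ported by hand (PySem's rstrip takes no chars argument):
-- drop characters of the given set from the reversed list — exact for str.rstrip(chars).
def pvRstripDigits (cs : List Char) : List Char :=
  ((cs.reverse).dropWhile (fun c => ("0123456789".toList).contains c)).reverse

def extractYearFromUrlOld_alt (url : String) : Option String :=
  if PySem.Str.len url = 0 then none
  else
    let i0 := PySem.Str.rfind url "/http://"
    let idx := if i0 < 0 then PySem.Str.rfind url "/https://" else i0
    let pfx := PySem.List.slice url.toList none (some (max idx 0))
    let run := pfx.drop (pvRstripDigits pfx).length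
    some (String.ofList (PySem.List.slice run none (some 4)))

-- ===== PRECONDITION & SPEC =====
def Spec_extractYearFromUrlOld (url : String) (out : Option String) : Prop := out = extractYearFromUrlOld_alt url
instance (url : String) (out : Option String) : Decidable (Spec_extractYearFromUrlOld url out) := by unfold Spec_extractYearFromUrlOld; infer_instance

-- ===== CLAIM (what is proved, stated in full; the proofs are below) =====
def Claim_equal_extractYearFromUrlOld : Prop := ∀ (url : String), Dom_extractYearFromUrlOld url → Spec_extractYearFromUrlOld url (extractYearFromUrlOld url)

-- ===== LEMMAS AND PROOFS =====

-- int(c) on a single domain character succeeds exactly on '0'..'9'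
lemma pv_ofChars_single (c : Char) (h : pvDomChar c = true) :
    (PySem.Int.ofChars? [c]).isSome = (("0123456789".toList).contains c) := by
  have hlt : c.toNat < 128 := by simp [pvDomChar] at h; omega
  have hall : ∀ n : Nat, n < 128 →
      (PySem.Int.ofChars? [Char.ofNat n]).isSome = (("0123456789".toList).contains (Char.ofNat n)) := by
    decide
  have := hall c.toNat hlt
  rwa [Char.ofNat_toNat c] at this

-- bounds of rfind
lemma pv_rfind_go_bounds (s sub : List Char) (j : Nat) :
    -1 ≤ PySem.Chars.rfind.go s sub j ∧ PySem.Chars.rfind.go s sub j ≤ (j : Int) := by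
  induction j with
  | zero => simp [PySem.Chars.rfind.go]; split <;> simp
  | succ j ih =>
      rw [PySem.Chars.rfind.go]
      split
      · constructor <;> omega
      · exact ⟨ih.1, by omega⟩

lemma pv_rfind_bounds (s sub : List Char) :
    -1 ≤ PySem.Chars.rfind s sub ∧ PySem.Chars.rfind s sub ≤ (s.length : Int) := by
  unfold PySem.Chars.rfind
  exact pv_rfind_go_bounds s sub s.length

-- A's loop computes the reversed trailing digit run of the first n characters
lemma pv_aLoop_eq (cs : List Char) (hdom : ∀ c ∈ cs, pvDomChar c = true) :
    ∀ n acc, n ≤ cs.length →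
      pvALoop cs n acc =
        ((cs.take n).reverse.takeWhile (fun c => ("0123456789".toList).contains c)).reverse ++ acc := by
  intro n
  induction n with
  | zero => intro acc _; simp [pvALoop]
  | succ j ih =>
    intro acc hle
    have hj : j < cs.length := by omega
    have hget : cs.getD j ' ' = cs[j] := List.getD_eq_getElem cs ' ' hj
    have htake : cs.take (j+1) = cs.take j ++ [cs[j]] := by
      rw [List.take_add_one, List.getElem?_eq_getElem hj]; rfl
    have hdig := pv_ofChars_single cs[j] (hdom _ (List.getElem_mem hj))
    have hrev : (List.take (j+1) cs).reverse = cs[j] :: (List.take j cs).reverse := by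
      rw [htake]; simp
    rw [pvALoop, hget]
    cases hof : PySem.Int.ofChars? [cs[j]] with
    | some v =>
      rw [hof] at hdig
      simp only [Option.isSome_some] at hdig
      rw [ih (cs[j] :: acc) (by omega), hrev,
        List.takeWhile_cons_of_pos hdig.symm, List.reverse_cons, List.append_assoc]
      rfl
    | none =>
      rw [hof] at hdig
      simp only [Option.isSome_none] at hdig
      rw [hrev, List.takeWhile_cons_of_neg (by rw [← hdig]; simp), List.reverse_nil,
        List.nil_append]

-- dropping rstrip's length leaves the reversed trailing run
lemma pv_drop_rstrip (l : List Char) :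
    l.drop (pvRstripDigits l).length =
      (l.reverse.takeWhile (fun c => ("0123456789".toList).contains c)).reverse := by
  have key : l = (List.dropWhile (fun c => ("0123456789".toList).contains c) l.reverse).reverse
      ++ (List.takeWhile (fun c => ("0123456789".toList).contains c) l.reverse).reverse := by
    rw [← List.reverse_append, List.takeWhile_append_dropWhile, List.reverse_reverse]
  rw [pvRstripDigits, List.length_reverse]
  nth_rewrite 2 [key]
  rw [List.drop_left' (by rw [List.length_reverse])]

-- ===== VERDICT (by name: the statement is the Claim_ definition above) =====
theorem extractYearFromUrlOld_spec : Claim_equal_extractYearFromUrlOld := by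
  intro url hdom
  have hdoml : ∀ c ∈ url.toList, pvDomChar c = true := by
    unfold Dom_extractYearFromUrlOld pvDomStr at hdom
    simpa [List.all_eq_true] using hdom
  unfold Spec_extractYearFromUrlOld extractYearFromUrlOld extractYearFromUrlOld_alt
  simp only [PySem.Str.len_eq, PySem.Str.rfind_eq]
  by_cases hemp : url.toList.length = 0
  · simp [hemp]
  · have hpos : (0:Int) < (url.toList.length : Int) := by
      have := Nat.pos_of_ne_zero hemp; exact_mod_cast this
    rw [if_pos (show (url.toList.length : Int) > 0 from hpos),
      if_neg (show ¬((url.toList.length : Int) = 0) by omega)]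
    set cs := url.toList with hcs
    obtain ⟨hb1a, hb1b⟩ := pv_rfind_bounds cs "/http://".toList
    obtain ⟨hb2a, hb2b⟩ := pv_rfind_bounds cs "/https://".toList
    set idx : Int := if PySem.Chars.rfind cs "/http://".toList < 0
        then PySem.Chars.rfind cs "/https://".toList
        else PySem.Chars.rfind cs "/http://".toList with hidx
    have hbnd : -1 ≤ idx ∧ idx ≤ (cs.length : Int) := by
      rw [hidx]; split_ifs with h
      · exact ⟨hb2a, hb2b⟩
      · exact ⟨hb1a, hb1b⟩
    have hn : (idx - 1 + 1).toNat = idx.toNat := by omega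
    have hmax : (max idx 0).toNat = idx.toNat := by omega
    have hle : idx.toNat ≤ cs.length := by omega
    rw [hn, pv_aLoop_eq cs hdoml idx.toNat [] hle, List.append_nil,
      PySem.List.slice_to _ (show (0:Int) ≤ max idx 0 by omega), hmax,
      pv_drop_rstrip (cs.take idx.toNat), PySem.List.slice_zero_start,
      PySem.List.slice_to _ (show (0:Int) ≤ 4 by norm_num)]
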